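-- pv_equiv track=rewrite | github.com/CDH-Studio/screendoor | screendoor/views.py | create_applicants_wth_favourite_information
-- ===== SOURCE A (Python) =====
-- def create_applicants_wth_favourite_information(applicants, favourites):
--     stitched_lists = {}
--     for applicant in applicants:
--         if applicant in favourites:
--             stitched_lists[applicant] = True
--         else:
--             stitched_lists[applicant] = False
--     return stitched_lists
-- ===== SOURCE B (Python) =====
-- def create_applicants_wth_favourite_information(applicants, favourites):
--     result = dict.fromkeys(applicants, False)
--     for fav in favourites:
--         if fav in result:
--             result[fav] = True
--     return result
-- ===== Notes on version B (the rewrite author's own statement) =====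
-- stated objective: faster
-- what changed: Instead of testing each applicant against the favourites list (linear scan per applicant), B prebuilds the table with dict.fromkeys(applicants, False) and then loops over favourites, flipping to True the entries already present.
import Mathlib
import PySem

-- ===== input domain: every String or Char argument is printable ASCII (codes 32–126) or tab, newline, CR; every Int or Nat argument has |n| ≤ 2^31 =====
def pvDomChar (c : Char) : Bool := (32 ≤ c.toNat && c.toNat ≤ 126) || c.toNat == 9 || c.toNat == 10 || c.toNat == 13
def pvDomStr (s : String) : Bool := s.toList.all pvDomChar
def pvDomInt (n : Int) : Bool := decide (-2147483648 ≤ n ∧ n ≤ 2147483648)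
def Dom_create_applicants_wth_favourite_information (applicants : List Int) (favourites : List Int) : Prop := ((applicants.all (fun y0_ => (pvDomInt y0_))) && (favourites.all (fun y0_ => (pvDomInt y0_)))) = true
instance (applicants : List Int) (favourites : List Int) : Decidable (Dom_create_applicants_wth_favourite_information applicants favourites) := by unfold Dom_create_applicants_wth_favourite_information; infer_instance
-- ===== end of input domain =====

-- B replaces A's per-applicant scan of the favourites list with a prebuilt table
-- (dict.fromkeys(applicants, False)) updated by a single loop over favourites (objective: faster).

-- ===== PORT A =====
def create_applicants_wth_favourite_information (applicants : List Int) (favourites : List Int) : List (Int × Bool) :=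
  -- stitched_lists = {}; for applicant in applicants: stitched_lists[applicant] = (applicant in favourites)
  (applicants.foldl
    (fun d applicant =>
      if favourites.contains applicant then d.insert applicant true
      else d.insert applicant false)
    PySem.Dict.empty).items

-- ===== PORT B =====
def create_applicants_wth_favourite_information_alt (applicants : List Int) (favourites : List Int) : List (Int × Bool) :=
  -- result = dict.fromkeys(applicants, False)  (exact: inserts each key with False, first occurrence keeps position)
  let init : PySem.Dict Int Bool :=
    applicants.foldl (fun d a => d.insert a false) PySem.Dict.empty
  -- for fav in favourites: if fav in result: result[fav] = True
  (favourites.foldl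
    (fun d fav => if d.contains fav then d.insert fav true else d)
    init).items

-- ===== PRECONDITION & SPEC =====
def Spec_create_applicants_wth_favourite_information (applicants : List Int) (favourites : List Int) (out : List (Int × Bool)) : Prop := out = create_applicants_wth_favourite_information_alt applicants favourites
instance (applicants : List Int) (favourites : List Int) (out : List (Int × Bool)) : Decidable (Spec_create_applicants_wth_favourite_information applicants favourites out) := by unfold Spec_create_applicants_wth_favourite_information; infer_instance

-- ===== CLAIM (what is proved, stated in full; the proofs are below) =====
def Claim_equal_create_applicants_wth_favourite_information : Prop := ∀ (applicants : List Int) (favourites : List Int), Dom_create_applicants_wth_favourite_information applicants favourites → Spec_create_applicants_wth_favourite_information applicants favourites (create_applicants_wth_favourite_information applicants favourites)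

-- ===== LEMMAS AND PROOFS =====

-- A's loop body, rewritten as a single insert (the branch only chooses the value).
theorem fold_a_step (d : PySem.Dict Int Bool) (favourites : List Int) (a : Int) :
    (if favourites.contains a then d.insert a true else d.insert a false)
      = d.insert a (favourites.contains a) := by
  by_cases h : a ∈ favourites <;> simp [h]

-- getD of an "insert a (c a)" fold, as a function of membership.
theorem getD_fold_insert (c : Int → Bool) (xs : List Int) (d : PySem.Dict Int Bool) (k : Int) :
    (xs.foldl (fun d a => d.insert a (c a)) d).getD k false
      = if k ∈ xs then c k else d.getD k false := by
  induction xs generalizing d with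
  | nil => simp
  | cons a rest ih =>
    simp only [List.foldl_cons, ih, PySem.Dict.getD_insert, List.mem_cons]
    by_cases h1 : k ∈ rest <;> by_cases h2 : k = a <;> simp [h1, h2]

-- B's favourites loop preserves the key set.
theorem keys_fold_fav (favs : List Int) (d : PySem.Dict Int Bool) :
    (favs.foldl (fun d f => if d.contains f then d.insert f true else d) d).keys = d.keys := by
  induction favs generalizing d with
  | nil => rfl
  | cons f rest ih =>
    simp only [List.foldl_cons]
    by_cases h : d.contains f = true
    · rw [if_pos h, ih]
      exact PySem.Dict.keys_insert_of_contains _ _ h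
    · simp [h, ih]

-- getD after B's favourites loop.
theorem getD_fold_fav (favs : List Int) (d : PySem.Dict Int Bool) (k : Int) :
    (favs.foldl (fun d f => if d.contains f then d.insert f true else d) d).getD k false
      = if k ∈ favs ∧ d.contains k = true then true else d.getD k false := by
  induction favs generalizing d with
  | nil => simp
  | cons f rest ih =>
    simp only [List.foldl_cons]
    by_cases hc : d.contains f = true
    · simp only [hc, if_true, ih, PySem.Dict.getD_insert, List.mem_cons,
        PySem.Dict.contains_insert]
      by_cases h1 : k ∈ rest <;> by_cases h2 : k = f <;>
        simp [h1, h2, hc]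
    · simp only [hc, ih, List.mem_cons]
      by_cases h1 : k ∈ rest <;> by_cases h2 : k = f <;>
        simp_all

theorem create_applicants_equiv (applicants favourites : List Int) :
    create_applicants_wth_favourite_information applicants favourites
      = create_applicants_wth_favourite_information_alt applicants favourites := by
  unfold create_applicants_wth_favourite_information create_applicants_wth_favourite_information_alt
  simp only [fold_a_step]
  set dA := applicants.foldl (fun d a => d.insert a (favourites.contains a)) PySem.Dict.empty with hdA
  set dI := applicants.foldl (fun d a => d.insert a false) PySem.Dict.empty with hdI
  set dB := favourites.foldl (fun d f => if d.contains f then d.insert f true else d) dI with hdB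
  have hkA : dA.keys = PySem.Set.ofList applicants := by
    rw [hdA, PySem.Dict.keys_foldl_insert]; rfl
  have hkI : dI.keys = PySem.Set.ofList applicants := by
    rw [hdI, PySem.Dict.keys_foldl_insert]; rfl
  have hkB : dB.keys = PySem.Set.ofList applicants := by
    rw [hdB, keys_fold_fav, hkI]
  have hndA : dA.keys.Nodup := by rw [hkA]; exact PySem.Set.nodup_ofList _
  have hndB : dB.keys.Nodup := by rw [hkB]; exact PySem.Set.nodup_ofList _
  rw [PySem.Dict.items_eq_map_keys dA hndA false, PySem.Dict.items_eq_map_keys dB hndB false,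
    hkA, hkB]
  apply List.map_congr_left
  intro k hk
  have hkmem : k ∈ applicants := (PySem.Set.mem_ofList _ _).mp hk
  have hA : dA.getD k false = favourites.contains k := by
    rw [hdA, getD_fold_insert]; simp [hkmem]
  have hI : dI.getD k false = false := by
    rw [hdI, getD_fold_insert (fun _ => false)]; simp
  have hIc : dI.contains k = true := by
    rw [PySem.Dict.contains_iff_mem_keys] at *
    rw [hkI]; exact hk
  have hB : dB.getD k false = favourites.contains k := by
    rw [hdB, getD_fold_fav, hI]
    by_cases h : k ∈ favourites <;> simp [h, hIc]
  rw [hA, hB]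

-- ===== VERDICT (by name: the statement is the Claim_ definition above) =====
theorem create_applicants_wth_favourite_information_spec : Claim_equal_create_applicants_wth_favourite_information := by
  intro applicants favourites _
  exact create_applicants_equiv applicants favourites
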